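-- pv_equiv track=rewrite | github.com/HackerManPeter/auto-response | form.py | __return_formatted_dict
-- ===== SOURCE A (Python) =====
-- def __return_formatted_dict(dictionary) -> dict:
--
--     for key, value in dictionary.items():
--         if type(value) == dict:
--             try:
--                 dictionary[key] = value['label']
--             except KeyError:
--                 try:
--                     dictionary[key] = value['labels']
--                 except KeyError:
--                     dictionary[key] = value['ids']
--
--     return dictionary
-- ===== SOURCE B (Python) =====
-- _PRIORITY = {'label': 0, 'labels': 1, 'ids': 2}
--
--
-- def __return_formatted_dict(dictionary) -> dict:
--     for key, value in dictionary.items():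
--         if type(value) == dict:
--             best = min((field for field in value if field in _PRIORITY),
--                        key=_PRIORITY.get)
--             dictionary[key] = value[best]
--     return dictionary
-- ===== Notes on version B (the rewrite author's own statement) =====
-- stated objective: alternative
-- what changed: Instead of probing the three fields with a nested try/except KeyError cascade, B scans each value's own keys against a priority-rank map ({'label':0,'labels':1,'ids':2}) and reads the min-ranked known field; Pre_ excludes inputs where a value has none of the three fields, on which A raises KeyError (B raises ValueError there).
import Mathlib
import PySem

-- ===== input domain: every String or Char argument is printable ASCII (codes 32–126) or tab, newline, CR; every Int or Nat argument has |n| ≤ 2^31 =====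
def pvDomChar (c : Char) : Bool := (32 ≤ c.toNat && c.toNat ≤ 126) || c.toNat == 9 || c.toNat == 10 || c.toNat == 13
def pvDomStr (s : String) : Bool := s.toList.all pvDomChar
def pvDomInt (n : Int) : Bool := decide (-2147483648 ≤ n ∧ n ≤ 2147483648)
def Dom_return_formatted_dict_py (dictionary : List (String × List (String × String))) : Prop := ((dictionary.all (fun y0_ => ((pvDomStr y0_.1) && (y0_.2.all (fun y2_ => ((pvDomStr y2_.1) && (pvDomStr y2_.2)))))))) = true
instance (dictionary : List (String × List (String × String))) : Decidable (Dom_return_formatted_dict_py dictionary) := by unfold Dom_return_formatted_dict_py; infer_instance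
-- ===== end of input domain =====

-- B replaces A's nested try/except field-probe cascade by a priority-rank map and a
-- min over each value's own keys (objective: alternative). Both Pythons mutate the
-- dict in place and return it; the equivalence proved is about the returned value.

-- ===== PORT A =====
-- Per-value cascade of A: value['label'], on KeyError value['labels'], on KeyError
-- value['ids'] — the last lookup raises KeyError when absent (outside Pre_), ported
-- totally as getD with default "".  `type(value) == dict` is always true at this type.
def return_formatted_dict_py (dictionary : List (String × List (String × String))) : List (String × String) :=
  ((PySem.Dict.ofList dictionary).items).map (fun p =>
    let v : PySem.Dict String String := PySem.Dict.ofList p.2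
    (p.1,
      match v.get? "label" with
      | some s => s
      | none =>
        match v.get? "labels" with
        | some s => s
        | none => v.getD "ids" ""))

-- ===== PORT B =====
def pvPriority : PySem.Dict String Int :=
  PySem.Dict.ofList [("label", 0), ("labels", 1), ("ids", 2)]

-- min((field for field in value if field in _PRIORITY), key=_PRIORITY.get);
-- the [] case is Python's ValueError from min of an empty iterable (outside Pre_),
-- ported totally as "".
def return_formatted_dict_py_alt (dictionary : List (String × List (String × String))) : List (String × String) :=
  ((PySem.Dict.ofList dictionary).items).map (fun p =>
    let v : PySem.Dict String String := PySem.Dict.ofList p.2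
    (p.1,
      match PySem.List.min? (v.keys.filter (fun f => pvPriority.contains f))
              (fun f => pvPriority.getD f 3) with
      | some best => v.getD best ""
      | none => ""))

-- ===== PRECONDITION & SPEC =====
-- Pre_ excludes exactly the inputs where Python A raises KeyError (and B ValueError):
-- some value of the dict (duplicate outer keys collapsed, last value wins) contains
-- none of the keys 'label', 'labels', 'ids'.
def Pre_return_formatted_dict_py (dictionary : List (String × List (String × String))) : Prop :=
  ∀ p ∈ (PySem.Dict.ofList dictionary).items,
    p.2.any (fun q => q.1 == "label" || q.1 == "labels" || q.1 == "ids") = true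
instance (dictionary : List (String × List (String × String))) : Decidable (Pre_return_formatted_dict_py dictionary) := by unfold Pre_return_formatted_dict_py; infer_instance

def pvWitness_return_formatted_dict_py : (List (String × List (String × String))) :=
  [("x", [("label", "l"), ("ids", "i")]), ("y", [("labels", "L")])]

def Spec_return_formatted_dict_py (dictionary : List (String × List (String × String))) (out : List (String × String)) : Prop := out = return_formatted_dict_py_alt dictionary
instance (dictionary : List (String × List (String × String))) (out : List (String × String)) : Decidable (Spec_return_formatted_dict_py dictionary out) := by unfold Spec_return_formatted_dict_py; infer_instance

-- ===== CLAIM (what is proved, stated in full; the proofs are below) =====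
def Claim_equal_return_formatted_dict_py : Prop := ∀ (dictionary : List (String × List (String × String))), Dom_return_formatted_dict_py dictionary → Pre_return_formatted_dict_py dictionary → Spec_return_formatted_dict_py dictionary (return_formatted_dict_py dictionary)

-- ===== LEMMAS AND PROOFS =====

-- contains on an ofList dict is an any over the input pairs
theorem pvContains_foldl {v : Type} (l : List (String × v)) (d : PySem.Dict String v) (k : String) :
    (l.foldl (fun d p => d.insert p.1 p.2) d).contains k
      = (d.contains k || l.any (fun p => p.1 == k)) := by
  induction l generalizing d with
  | nil => simp
  | cons a t ih =>
    simp only [List.foldl_cons, ih, PySem.Dict.contains_insert, List.any_cons]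
    cases h : (k == a.1) <;> cases h2 : (a.1 == k) <;> simp_all [BEq.comm]

theorem pvContains_ofList {v : Type} (l : List (String × v)) (k : String) :
    (PySem.Dict.ofList l).contains k = l.any (fun p => p.1 == k) := by
  simpa [PySem.Dict.contains_empty] using pvContains_foldl l PySem.Dict.empty k

-- a foldl whose step sends some to some never yields none from a some start
theorem pvFold_some_ne_none (f : Option String → String → Option String)
    (hf : ∀ m x, ∃ r, f (some m) x = some r) (t : List String) (m : String) :
    t.foldl f (some m) ≠ none := by
  induction t generalizing m with
  | nil => simp
  | cons b tb ih =>
    simp only [List.foldl_cons]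
    obtain ⟨r, hr⟩ := hf m b
    rw [hr]
    exact ih r

theorem pvMin?_isSome (k : String → Int) (xs : List String) (h : xs ≠ []) :
    ∃ m, PySem.List.min? xs k = some m := by
  cases xs with
  | nil => exact absurd rfl h
  | cons a t =>
    cases hm : PySem.List.min? (a :: t) k with
    | some m => exact ⟨m, rfl⟩
    | none =>
      exfalso
      simp [PySem.List.min?] at hm
      refine pvFold_some_ne_none _ ?_ t a hm
      intro m x
      dsimp only
      by_cases h : k x < k m <;> simp [h]

-- every candidate is one of the three known fields, and is present in the value
theorem pvCand_mem (v : PySem.Dict String String) (f : String)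
    (hf : f ∈ v.keys.filter (fun f => pvPriority.contains f)) :
    (f = "label" ∨ f = "labels" ∨ f = "ids") ∧ (v.get? f).isSome := by
  rw [List.mem_filter] at hf
  obtain ⟨hk, hp⟩ := hf
  refine ⟨?_, ?_⟩
  · rw [show pvPriority = PySem.Dict.ofList [("label", (0:Int)), ("labels", 1), ("ids", 2)] from rfl,
      pvContains_ofList] at hp
    simp only [List.any_cons, List.any_nil, Bool.or_eq_true, beq_iff_eq] at hp
    tauto
  · rw [← PySem.Dict.contains_eq_isSome_get?, PySem.Dict.contains_iff_mem_keys]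
    exact hk

theorem pvCand_of_get? (v : PySem.Dict String String) (f : String)
    (h3 : f = "label" ∨ f = "labels" ∨ f = "ids")
    (hs : (v.get? f).isSome) :
    f ∈ v.keys.filter (fun f => pvPriority.contains f) := by
  rw [List.mem_filter]
  constructor
  · rw [← PySem.Dict.contains_iff_mem_keys, PySem.Dict.contains_eq_isSome_get?]
    exact hs
  · rcases h3 with h | h | h <;> subst h <;> decide

-- the per-value selectors of the two ports agree on every value dict with a hit
theorem pvSel_eq (v : PySem.Dict String String)
    (hpre : (v.get? "label").isSome ∨ (v.get? "labels").isSome ∨ (v.get? "ids").isSome) :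
    (match v.get? "label" with
     | some s => s
     | none =>
       match v.get? "labels" with
       | some s => s
       | none => v.getD "ids" "") =
    (match PySem.List.min? (v.keys.filter (fun f => pvPriority.contains f))
             (fun f => pvPriority.getD f 3) with
     | some best => v.getD best ""
     | none => "") := by
  set cands := v.keys.filter (fun f => pvPriority.contains f) with hc
  have hrank : ∀ f, f = "label" ∨ f = "labels" ∨ f = "ids" →
      pvPriority.getD f 3 = (if f = "label" then 0 else if f = "labels" then 1 else 2) := by
    rintro f (h | h | h) <;> subst h <;> decide
  cases h1 : v.get? "label" with
  | some s =>
    have hmem : "label" ∈ cands := pvCand_of_get? v _ (Or.inl rfl) (by simp [h1])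
    obtain ⟨m, hmin⟩ := pvMin?_isSome _ cands (fun h => by simp [h] at hmem)
    rw [hmin]
    have hm := PySem.List.min?_mem hmin
    have hle := PySem.List.min?_isMin hmin "label" hmem
    obtain ⟨hm3, _⟩ := pvCand_mem v m hm
    have : m = "label" := by
      rcases hm3 with h | h | h
      · exact h
      all_goals (exfalso; rw [hrank m (by simp [h]), hrank "label" (Or.inl rfl)] at hle; simp [h] at hle)
    subst this
    simp [PySem.Dict.getD_eq_get?_getD, h1]
  | none =>
    cases h2 : v.get? "labels" with
    | some s =>
      have hmem : "labels" ∈ cands := pvCand_of_get? v _ (Or.inr (Or.inl rfl)) (by simp [h2])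
      obtain ⟨m, hmin⟩ := pvMin?_isSome _ cands (fun h => by simp [h] at hmem)
      rw [hmin]
      have hm := PySem.List.min?_mem hmin
      have hle := PySem.List.min?_isMin hmin "labels" hmem
      obtain ⟨hm3, hs⟩ := pvCand_mem v m hm
      have : m = "labels" := by
        rcases hm3 with h | h | h
        · exfalso; rw [h, h1] at hs; simp at hs
        · exact h
        · exfalso; rw [hrank m (by simp [h]), hrank "labels" (Or.inr (Or.inl rfl))] at hle
          simp [h] at hle
      subst this
      simp [PySem.Dict.getD_eq_get?_getD, h2]
    | none =>
      cases h3 : v.get? "ids" with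
      | some s =>
        have hmem : "ids" ∈ cands := pvCand_of_get? v _ (Or.inr (Or.inr rfl)) (by simp [h3])
        obtain ⟨m, hmin⟩ := pvMin?_isSome _ cands (fun h => by simp [h] at hmem)
        rw [hmin]
        have hm := PySem.List.min?_mem hmin
        obtain ⟨hm3, hs⟩ := pvCand_mem v m hm
        have : m = "ids" := by
          rcases hm3 with h | h | h
          · exfalso; rw [h, h1] at hs; simp at hs
          · exfalso; rw [h, h2] at hs; simp at hs
          · exact h
        subst this
        simp [PySem.Dict.getD_eq_get?_getD, h3]
      | none =>
        exfalso
        rcases hpre with h | h | h <;> simp [h1, h2, h3] at h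

-- Pre_'s per-entry condition gives one of the three get? hits
theorem pvPre_get? (l : List (String × String))
    (h : l.any (fun q => q.1 == "label" || q.1 == "labels" || q.1 == "ids") = true) :
    ((PySem.Dict.ofList l).get? "label").isSome ∨
    ((PySem.Dict.ofList l).get? "labels").isSome ∨
    ((PySem.Dict.ofList l).get? "ids").isSome := by
  rw [List.any_eq_true] at h
  obtain ⟨q, hq, hq3⟩ := h
  have hc : ∀ k : String, q.1 == k →
      ((PySem.Dict.ofList l).get? k).isSome = true := by
    intro k hk
    rw [← PySem.Dict.contains_eq_isSome_get?, pvContains_ofList, List.any_eq_true]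
    exact ⟨q, hq, hk⟩
  simp only [Bool.or_eq_true] at hq3
  rcases hq3 with (h | h) | h
  · exact Or.inl (hc _ h)
  · exact Or.inr (Or.inl (hc _ h))
  · exact Or.inr (Or.inr (hc _ h))

-- ===== VERDICT (by name: the statement is the Claim_ definition above) =====
theorem return_formatted_dict_py_spec : Claim_equal_return_formatted_dict_py := by
  intro dictionary _ hpre
  unfold Spec_return_formatted_dict_py return_formatted_dict_py return_formatted_dict_py_alt
  refine List.map_congr_left (fun p hp => ?_)
  have h := pvPre_get? p.2 (hpre p hp)
  show (p.1, _) = (p.1, _)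
  rw [pvSel_eq _ h]
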